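-- pv_equiv track=rewrite | github.com/WouterApts/GoGetter-CatAndMouse-Solver | main.py | negative_constraints_met
-- ===== SOURCE A (Python) =====
-- def negative_constraints_met(connections_list, constraints):
--     if len(constraints) == 0:
--         return True
--     for connection in connections_list:
--         for constraint in constraints:
--             overlap = list(set(connection).intersection(constraint))
--             if len(overlap) >= 2:
--                 return False
--     return True
-- ===== SOURCE B (Python) =====
-- def negative_constraints_met(connections_list, constraints):
--     # Inverted index: element -> indices of connections containing it; then tally,
--     # per connection, how many distinct elements of each constraint it contains.
--     index = {}
--     for i, connection in enumerate(connections_list):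
--         for x in set(connection):
--             index.setdefault(x, []).append(i)
--     for constraint in constraints:
--         counts = {}
--         for x in set(constraint):
--             for i in index.get(x, ()):
--                 c = counts.get(i, 0) + 1
--                 if c >= 2:
--                     return False
--                 counts[i] = c
--     return True
-- ===== Notes on version B (the rewrite author's own statement) =====
-- stated objective: alternative
-- what changed: Replaces A's connection-by-constraint set-intersection scan with an inverted index mapping each element to the connection indices containing it, then tallies per connection how many distinct elements of each constraint it shares, returning False as soon as a tally reaches 2; this avoids the |connections|x|constraints| cross-product of intersections.
import Mathlib
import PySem

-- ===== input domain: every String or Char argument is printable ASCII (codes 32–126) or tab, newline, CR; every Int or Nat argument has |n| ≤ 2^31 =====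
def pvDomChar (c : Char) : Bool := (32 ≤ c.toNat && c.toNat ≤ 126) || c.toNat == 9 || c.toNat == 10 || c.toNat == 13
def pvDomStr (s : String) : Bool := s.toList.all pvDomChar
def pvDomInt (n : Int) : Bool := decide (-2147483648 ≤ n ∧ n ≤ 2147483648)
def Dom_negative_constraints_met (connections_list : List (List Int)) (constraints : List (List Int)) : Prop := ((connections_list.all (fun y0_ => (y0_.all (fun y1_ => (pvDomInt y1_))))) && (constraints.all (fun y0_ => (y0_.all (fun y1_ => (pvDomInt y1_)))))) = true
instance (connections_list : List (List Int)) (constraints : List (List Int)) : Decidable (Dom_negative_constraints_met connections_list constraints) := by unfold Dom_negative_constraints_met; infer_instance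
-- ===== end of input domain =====

-- B replaces A's connection-by-constraint intersection scan with an inverted index
-- (element -> connection indices) plus a per-constraint tally of shared distinct elements
-- (objective: alternative; avoids the connections x constraints cross-product, early exit on a tally of 2).


-- ===== PORT A =====
-- Python: list(set(connection).intersection(constraint)); only its len is used, so the
-- un-modelled hash order of list(...) cannot affect the result (the Set's length is exact).
def negative_constraints_met (connections_list : List (List Int)) (constraints : List (List Int)) : Bool :=
  if constraints.length == 0 then true
  else
    connections_list.all (fun connection =>
      constraints.all (fun constraint =>
        let overlap := PySem.Set.inter (PySem.Set.ofList connection) constraint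
        !(2 ≤ overlap.length : Bool)))

-- ===== PORT B =====
-- index.setdefault(x, []).append(i) : the in-place append is d[x] = d.get(x, []) + [i].
-- Set-iteration order is consumed only to build a Dict that is later only looked up
-- (index) and an order-independent tally (counts), so it cannot affect the result.
def nbIndex (connections_list : List (List Int)) : PySem.Dict Int (List Int) :=
  (PySem.List.enumerate connections_list).foldl
    (fun d p => (PySem.Set.ofList p.2).foldl
      (fun d2 x => d2.insert x (d2.getD x [] ++ [p.1])) d)
    PySem.Dict.empty

-- 'for i in index.get(x, ()): c = counts.get(i, 0) + 1; if c >= 2: return False; counts[i] = c'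
def nbInner (counts : PySem.Dict Int Int) (idxs : List Int) : Option (PySem.Dict Int Int) :=
  match idxs with
  | [] => some counts
  | i :: rest =>
      let c := counts.getD i 0 + 1
      if 2 ≤ c then none else nbInner (counts.insert i c) rest

-- 'for x in set(constraint): ...' (None = the early 'return False')
def nbElems (index : PySem.Dict Int (List Int)) (counts : PySem.Dict Int Int) :
    List Int → Option (PySem.Dict Int Int)
  | [] => some counts
  | x :: rest =>
      match nbInner counts (index.getD x []) with
      | none => none
      | some c2 => nbElems index c2 rest

-- 'for constraint in constraints: counts = {}; ...'
def nbConstraints (index : PySem.Dict Int (List Int)) : List (List Int) → Bool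
  | [] => true
  | c :: rest =>
      match nbElems index PySem.Dict.empty (PySem.Set.ofList c) with
      | none => false
      | some _ => nbConstraints index rest

def negative_constraints_met_alt (connections_list : List (List Int)) (constraints : List (List Int)) : Bool :=
  nbConstraints (nbIndex connections_list) constraints

-- ===== PRECONDITION & SPEC =====
def Spec_negative_constraints_met (connections_list : List (List Int)) (constraints : List (List Int)) (out : Bool) : Prop := out = negative_constraints_met_alt connections_list constraints
instance (connections_list : List (List Int)) (constraints : List (List Int)) (out : Bool) : Decidable (Spec_negative_constraints_met connections_list constraints out) := by unfold Spec_negative_constraints_met; infer_instance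

-- ===== CLAIM (what is proved, stated in full; the proofs are below) =====
def Claim_equal_negative_constraints_met : Prop := ∀ (connections_list : List (List Int)) (constraints : List (List Int)), Dom_negative_constraints_met connections_list constraints → Spec_negative_constraints_met connections_list constraints (negative_constraints_met connections_list constraints)

-- ===== LEMMAS AND PROOFS =====

-- the inner index-building fold appends p.1 to exactly the keys in the (Nodup) element list
lemma nbIndex_inner_getD (s : List Int) (hs : s.Nodup) (i : Int)
    (d : PySem.Dict Int (List Int)) (y : Int) :
    (s.foldl (fun d2 x => d2.insert x (d2.getD x [] ++ [i])) d).getD y [] =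
      if y ∈ s then d.getD y [] ++ [i] else d.getD y [] := by
  induction s generalizing d with
  | nil => simp
  | cons x rest ih =>
    obtain ⟨hx, hrest⟩ := List.nodup_cons.mp hs
    rw [List.foldl_cons, ih hrest]
    by_cases hy : y ∈ rest
    · have hyx : y ≠ x := fun h => hx (h ▸ hy)
      simp [hy, hyx, PySem.Dict.getD_insert]
    · by_cases hyx : y = x
      · subst hyx
        simp [hy]
      · simp [hy, hyx, PySem.Dict.getD_insert]

-- the whole index fold: value at y = accumulator's value ++ first components of the
-- pairs whose second component contains y
lemma nbIndex_foldl_getD (l : List (Int × List Int)) (d : PySem.Dict Int (List Int)) (y : Int) :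
    (l.foldl (fun d p => (PySem.Set.ofList p.2).foldl
        (fun d2 x => d2.insert x (d2.getD x [] ++ [p.1])) d) d).getD y [] =
      d.getD y [] ++ (l.filter (fun p => decide (y ∈ p.2))).map (fun p => p.1) := by
  induction l generalizing d with
  | nil => simp
  | cons p rest ih =>
    rw [List.foldl_cons, ih, nbIndex_inner_getD _ (PySem.Set.nodup_ofList p.2)]
    by_cases hy : y ∈ p.2
    · simp [hy, PySem.Set.mem_ofList]
    · simp [hy, PySem.Set.mem_ofList]

lemma nbIndex_getD (connections_list : List (List Int)) (y : Int) :
    (nbIndex connections_list).getD y [] =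
      ((PySem.List.enumerate connections_list).filter (fun p => decide (y ∈ p.2))).map
        (fun p => p.1) := by
  unfold nbIndex
  rw [nbIndex_foldl_getD]
  simp

-- every first component in 'enumerate xs s' is ≥ s
lemma enumerate_fst_le {α : Type} (xs : List α) (s : Int) :
    ∀ p ∈ PySem.List.enumerate xs s, s ≤ p.1 := by
  induction xs generalizing s with
  | nil => simp [PySem.List.enumerate_nil]
  | cons x rest ih =>
    intro p hp
    rw [PySem.List.enumerate_cons] at hp
    rcases List.mem_cons.mp hp with rfl | hp
    · simp
    · have := ih (s + 1) p hp
      omega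

-- first components identify the pair within 'enumerate'
lemma enumerate_fst_inj {α : Type} (xs : List α) (s : Int) :
    ∀ p ∈ PySem.List.enumerate xs s, ∀ q ∈ PySem.List.enumerate xs s, p.1 = q.1 → p = q := by
  induction xs generalizing s with
  | nil => simp [PySem.List.enumerate_nil]
  | cons x rest ih =>
    intro p hp q hq heq
    rw [PySem.List.enumerate_cons] at hp hq
    rcases List.mem_cons.mp hp with rfl | hp <;> rcases List.mem_cons.mp hq with rfl | hq
    · rfl
    · exact absurd (heq ▸ enumerate_fst_le rest (s + 1) q hq) (by simp)
    · exact absurd (heq ▸ enumerate_fst_le rest (s + 1) p hp) (by simp)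
    · exact ih (s + 1) p hp q hq heq

lemma mem_nbIndex_getD (connections_list : List (List Int)) (x i : Int) :
    i ∈ (nbIndex connections_list).getD x [] ↔
      ∃ p ∈ PySem.List.enumerate connections_list, p.1 = i ∧ x ∈ p.2 := by
  rw [nbIndex_getD]
  simp only [List.mem_map, List.mem_filter, decide_eq_true_eq]
  constructor
  · rintro ⟨p, ⟨hp, hx⟩, rfl⟩
    exact ⟨p, hp, rfl, hx⟩
  · rintro ⟨p, hp, rfl, hx⟩
    exact ⟨p, ⟨hp, hx⟩, rfl⟩

lemma nodup_nbIndex_getD (connections_list : List (List Int)) (x : Int) :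
    ((nbIndex connections_list).getD x []).Nodup := by
  rw [nbIndex_getD]
  have hsub : (List.filter (fun p : Int × List Int => decide (x ∈ p.2))
      (PySem.List.enumerate connections_list)).Sublist (PySem.List.enumerate connections_list) :=
    List.filter_sublist
  refine List.Nodup.sublist (hsub.map (fun p => p.1)) ?_
  rw [PySem.List.map_fst_enumerate]
  exact PySem.List.nodup_pyRange_one 0 (0 + connections_list.length)

-- the tally loop over one index list: 'none' = some counter reached 2
lemma nbInner_spec (idxs : List Int) :
    idxs.Nodup →
    ∀ counts : PySem.Dict Int Int,
      (∀ i, 0 ≤ counts.getD i 0 ∧ counts.getD i 0 ≤ 1) →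
      ((nbInner counts idxs = none ↔ ∃ i ∈ idxs, counts.getD i 0 = 1) ∧
        (∀ c, nbInner counts idxs = some c →
          ∀ i, c.getD i 0 = counts.getD i 0 + (if i ∈ idxs then 1 else 0))) := by
  induction idxs with
  | nil => intro _ counts hb; simp [nbInner]
  | cons i rest ih =>
    intro hnd counts hb
    obtain ⟨hi, hrest⟩ := List.nodup_cons.mp hnd
    by_cases h2 : 2 ≤ counts.getD i 0 + 1
    · have hiv := hb i
      have hnone : nbInner counts (i :: rest) = none := by simp [nbInner, if_pos h2]
      refine ⟨by rw [hnone]; exact iff_of_true rfl ⟨i, by simp, by omega⟩, ?_⟩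
      intro c hc
      rw [hnone] at hc
      exact absurd hc (by simp)
    · have hzero : counts.getD i 0 = 0 := by have := hb i; omega
      have hstep : nbInner counts (i :: rest) =
          nbInner (counts.insert i (counts.getD i 0 + 1)) rest := by
        simp [nbInner, if_neg h2]
      have hb' : ∀ j, 0 ≤ (counts.insert i (counts.getD i 0 + 1)).getD j 0 ∧
          (counts.insert i (counts.getD i 0 + 1)).getD j 0 ≤ 1 := by
        intro j
        rw [PySem.Dict.getD_insert]
        split_ifs with h
        · omega
        · exact hb j
      obtain ⟨ih1, ih2⟩ := ih hrest (counts.insert i (counts.getD i 0 + 1)) hb'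
      constructor
      · rw [hstep, ih1]
        constructor
        · rintro ⟨j, hj, hval⟩
          have hji : j ≠ i := fun h => hi (h ▸ hj)
          rw [PySem.Dict.getD_insert, if_neg hji] at hval
          exact ⟨j, List.mem_cons_of_mem _ hj, hval⟩
        · rintro ⟨j, hj, hval⟩
          rcases List.mem_cons.mp hj with rfl | hj
          · omega
          · have hji : j ≠ i := fun h => hi (h ▸ hj)
            exact ⟨j, hj, by rw [PySem.Dict.getD_insert, if_neg hji]; exact hval⟩
      · intro c hc j
        rw [hstep] at hc
        have hf := ih2 c hc j
        rw [PySem.Dict.getD_insert] at hf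
        by_cases hji : j = i
        · subst hji
          have hjr : j ∉ rest := hi
          simp [hjr, hzero] at hf ⊢
          omega
        · simp only [if_neg hji] at hf
          simp [List.mem_cons, hji, hf]

-- the loop over a constraint's distinct elements: 'none' = some connection index
-- collects two distinct shared elements
lemma nbElems_spec (index : PySem.Dict Int (List Int))
    (hidx : ∀ x, (index.getD x []).Nodup) :
    ∀ (xs : List Int) (counts : PySem.Dict Int Int),
      (∀ i, 0 ≤ counts.getD i 0 ∧ counts.getD i 0 ≤ 1) →
      ((nbElems index counts xs = none ↔
          ∃ i : Int, 2 ≤ counts.getD i 0 +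
            ((xs.countP (fun x => decide (i ∈ index.getD x []))) : Int)) ∧
        (∀ c, nbElems index counts xs = some c →
          ∀ i, c.getD i 0 = counts.getD i 0 +
            ((xs.countP (fun x => decide (i ∈ index.getD x []))) : Int))) := by
  intro xs
  induction xs with
  | nil =>
    intro counts hb
    constructor
    · rw [show nbElems index counts [] = some counts from rfl]
      simp only [List.countP_nil]
      constructor
      · intro h
        exact absurd h (by simp)
      · rintro ⟨i, h⟩
        have := hb i
        simp only [Nat.cast_zero, add_zero] at h
        omega
    · intro c hc i
      rw [show nbElems index counts [] = some counts from rfl] at hc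
      simp only [Option.some.injEq] at hc
      simp [← hc]
  | cons x rest ih =>
    intro counts hb
    obtain ⟨hn1, hn2⟩ := nbInner_spec (index.getD x []) (hidx x) counts hb
    cases hcase : nbInner counts (index.getD x []) with
    | none =>
      have hstep : nbElems index counts (x :: rest) = none := by simp [nbElems, hcase]
      obtain ⟨j, hj, hval⟩ := hn1.mp hcase
      constructor
      · rw [hstep]
        refine iff_of_true rfl ⟨j, ?_⟩
        have hj' : decide (j ∈ index.getD x []) = true := by simpa using hj
        rw [List.countP_cons, hj', if_pos rfl]
        push_cast
        omega
      · intro c hc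
        rw [hstep] at hc
        exact absurd hc (by simp)
    | some c2 =>
      have hno : ¬ ∃ i ∈ index.getD x [], counts.getD i 0 = 1 := by
        rw [← hn1, hcase]; simp
      have hform := hn2 c2 hcase
      have hb2 : ∀ i, 0 ≤ c2.getD i 0 ∧ c2.getD i 0 ≤ 1 := by
        intro i
        have h1 := hb i
        have h2 := hform i
        by_cases hmem : i ∈ index.getD x []
        · have : counts.getD i 0 ≠ 1 := fun h => hno ⟨i, hmem, h⟩
          rw [if_pos hmem] at h2
          omega
        · rw [if_neg hmem] at h2
          omega
      obtain ⟨ih1, ih2⟩ := ih c2 hb2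
      have hstep : nbElems index counts (x :: rest) = nbElems index c2 rest := by
        simp [nbElems, hcase]
      have hkey : ∀ i : Int, c2.getD i 0 +
          ((rest.countP (fun y => decide (i ∈ index.getD y []))) : Int) =
          counts.getD i 0 +
          (((x :: rest).countP (fun y => decide (i ∈ index.getD y []))) : Int) := by
        intro i
        have h2 := hform i
        by_cases hmem : i ∈ index.getD x []
        · have hd : decide (i ∈ index.getD x []) = true := by simpa using hmem
          rw [if_pos hmem] at h2
          rw [List.countP_cons, hd, if_pos rfl]
          push_cast
          omega
        · have hd : decide (i ∈ index.getD x []) = false := by simpa using hmem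
          rw [if_neg hmem] at h2
          rw [List.countP_cons, hd, if_neg Bool.false_ne_true]
          push_cast
          omega
      constructor
      · rw [hstep, ih1]
        exact exists_congr fun i => by rw [hkey i]
      · intro c hc i
        rw [hstep] at hc
        rw [ih2 c hc i, hkey i]

lemma nbConstraints_iff (index : PySem.Dict Int (List Int))
    (hidx : ∀ x, (index.getD x []).Nodup) (cs : List (List Int)) :
    nbConstraints index cs = true ↔
      ∀ c ∈ cs, ¬ ∃ i : Int,
        2 ≤ (((PySem.Set.ofList c).countP (fun x => decide (i ∈ index.getD x []))) : Int) := by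
  induction cs with
  | nil => simp [nbConstraints]
  | cons c rest ih =>
    obtain ⟨h1, _⟩ := nbElems_spec index hidx (PySem.Set.ofList c) PySem.Dict.empty
      (by intro i; simp)
    cases hcase : nbElems index PySem.Dict.empty (PySem.Set.ofList c) with
    | none =>
      have hfalse : nbConstraints index (c :: rest) = false := by simp [nbConstraints, hcase]
      rw [hfalse]
      refine iff_of_false (by simp) ?_
      intro h
      obtain ⟨i, hi⟩ := h1.mp hcase
      exact h c (by simp) ⟨i, by simpa using hi⟩
    | some c2 =>
      have hno : ¬ ∃ i : Int, 2 ≤ PySem.Dict.empty.getD i 0 +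
          (((PySem.Set.ofList c).countP (fun x => decide (i ∈ index.getD x []))) : Int) := by
        rw [← h1, hcase]; simp
      have hstep : nbConstraints index (c :: rest) = nbConstraints index rest := by
        simp [nbConstraints, hcase]
      rw [hstep, ih]
      constructor
      · intro h c' hc'
        rcases List.mem_cons.mp hc' with rfl | hc'
        · rintro ⟨i, hi⟩
          exact hno ⟨i, by simpa using hi⟩
        · exact h c' hc'
      · intro h c' hc'
        exact h c' (List.mem_cons_of_mem _ hc')

-- |set(conn) ∩ c| as a count over the distinct elements of c
lemma inter_length_eq_countP (conn c : List Int) :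
    ((PySem.Set.inter (PySem.Set.ofList conn) c).length : Nat) =
      (PySem.Set.ofList c).countP (fun x => decide (x ∈ conn)) := by
  rw [List.countP_eq_length_filter]
  refine (List.Perm.length_eq ?_)
  refine (List.perm_ext_iff_of_nodup ?_ ?_).mpr ?_
  · exact PySem.Set.nodup_inter _ _ (PySem.Set.nodup_ofList conn)
  · exact (PySem.Set.nodup_ofList c).filter _
  · intro a
    simp only [PySem.Set.mem_inter, PySem.Set.mem_ofList, List.mem_filter, decide_eq_true_eq]
    tauto

-- for p ∈ enumerate(connections_list): 'p.1 ∈ index[x]' says exactly 'x ∈ p.2'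
lemma countP_index_congr (connections_list : List (List Int)) (c : List Int)
    (p : Int × List Int) (hp : p ∈ PySem.List.enumerate connections_list) :
    (PySem.Set.ofList c).countP
        (fun x => decide (p.1 ∈ (nbIndex connections_list).getD x [])) =
      (PySem.Set.ofList c).countP (fun x => decide (x ∈ p.2)) := by
  refine List.countP_congr fun x _ => ?_
  simp only [decide_eq_true_eq, mem_nbIndex_getD]
  constructor
  · rintro ⟨q, hq, hq1, hx⟩
    rw [← enumerate_fst_inj connections_list 0 q hq p hp hq1]
    exact hx
  · intro hx
    exact ⟨p, hp, rfl, hx⟩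

-- the ∃-index form of a violation equals the ∃-connection form
lemma exists_index_iff (connections_list : List (List Int)) (c : List Int) :
    (∃ i : Int, 2 ≤ (((PySem.Set.ofList c).countP
        (fun x => decide (i ∈ (nbIndex connections_list).getD x []))) : Int)) ↔
      ∃ conn ∈ connections_list,
        2 ≤ (PySem.Set.inter (PySem.Set.ofList conn) c).length := by
  constructor
  · rintro ⟨i, hi⟩
    have hpos : 0 < (PySem.Set.ofList c).countP
        (fun x => decide (i ∈ (nbIndex connections_list).getD x [])) := by omega
    obtain ⟨x0, hx0, hx0i⟩ := List.countP_pos_iff.mp hpos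
    rw [decide_eq_true_eq, mem_nbIndex_getD] at hx0i
    obtain ⟨p, hp, hpi, _⟩ := hx0i
    refine ⟨p.2, ?_, ?_⟩
    · rw [← PySem.List.map_snd_enumerate connections_list 0]
      exact List.mem_map.mpr ⟨p, hp, rfl⟩
    · have hcount := countP_index_congr connections_list c p hp
      rw [hpi] at hcount
      rw [inter_length_eq_countP, ← hcount]
      omega
  · rintro ⟨conn, hconn, hlen⟩
    obtain ⟨p, hp, hpc⟩ := List.mem_map.mp
      ((PySem.List.map_snd_enumerate connections_list 0) ▸ hconn)
    refine ⟨p.1, ?_⟩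
    have hcount := countP_index_congr connections_list c p hp
    rw [hpc] at hcount
    rw [hcount]
    rw [inter_length_eq_countP] at hlen
    omega

-- ===== VERDICT (by name: the statement is the Claim_ definition above) =====
theorem negative_constraints_met_spec : Claim_equal_negative_constraints_met := by
  intro conns cons _
  unfold Spec_negative_constraints_met
  unfold negative_constraints_met negative_constraints_met_alt
  by_cases hc : cons = []
  · subst hc
    simp [nbConstraints]
  · rw [if_neg (by simp [hc])]
    rw [Bool.eq_iff_iff]
    rw [nbConstraints_iff _ (nodup_nbIndex_getD conns)]
    simp only [List.all_eq_true, Bool.not_eq_true', decide_eq_false_iff_not]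
    constructor
    · intro h c hcmem
      rw [exists_index_iff]
      rintro ⟨conn, hconn, hlen⟩
      exact h conn hconn c hcmem hlen
    · intro h conn hconn c hcmem hlen
      exact h c hcmem ((exists_index_iff conns c).mpr ⟨conn, hconn, hlen⟩)
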